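-- pv_equiv track=rewrite | github.com/EliottFlechtner/AdventOfCode | 2024/d9.py | identify_ranges
-- ===== SOURCE A (Python) =====
-- def identify_ranges(disk_map):
--     free = []
--     blocks = []
--     i = 0
--
--     while i < len(disk_map):
--         beg = i
--         if disk_map[i] is None:
--             while i < len(disk_map) and disk_map[i] is None:
--                 i += 1
--             free.append((beg, i - beg))
--         else:
--             current_value = disk_map[i]
--             while i < len(disk_map) and disk_map[i] == current_value:
--                 i += 1
--             blocks.append((beg, i - beg))
--     return free, blocks[::-1]
-- ===== SOURCE B (Python) =====
-- def identify_ranges(disk_map):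
--     # Staged, stateless pipeline instead of a stateful scan: (1) compute the
--     # list of run-boundary indices, (2) pair consecutive boundaries with zip
--     # to get the runs, (3) filter the runs into free and block ranges.
--     n = len(disk_map)
--     bounds = [0] + [i for i in range(1, n) if disk_map[i] != disk_map[i - 1]] + ([n] if n else [])
--     pairs = list(zip(bounds, bounds[1:]))
--     free = [(b, e - b) for b, e in pairs if disk_map[b] is None]
--     blocks = [(b, e - b) for b, e in pairs if disk_map[b] is not None]
--     return free, blocks[::-1]
-- ===== Notes on version B (the rewrite author's own statement) =====
-- stated objective: alternative
-- what changed: Replaced A's stateful scan (nested while-loops advancing an index and appending to mutable accumulators) by a stateless staged pipeline: one comprehension listing the run-boundary indices, zip of consecutive boundaries to form the runs, and two filters splitting them into free and block ranges.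
import Mathlib
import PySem

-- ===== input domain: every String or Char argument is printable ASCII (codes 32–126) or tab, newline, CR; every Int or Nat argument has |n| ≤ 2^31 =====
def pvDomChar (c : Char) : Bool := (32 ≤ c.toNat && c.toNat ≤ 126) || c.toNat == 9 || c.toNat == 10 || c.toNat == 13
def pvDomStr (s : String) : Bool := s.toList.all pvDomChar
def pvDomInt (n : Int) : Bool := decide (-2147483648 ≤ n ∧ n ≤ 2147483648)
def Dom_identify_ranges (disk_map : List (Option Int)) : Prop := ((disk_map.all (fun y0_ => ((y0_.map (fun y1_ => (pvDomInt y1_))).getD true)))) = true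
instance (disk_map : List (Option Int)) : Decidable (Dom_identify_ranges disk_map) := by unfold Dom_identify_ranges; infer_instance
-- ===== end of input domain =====

-- B replaces A's stateful scan (nested whiles, mutable accumulators) by a stateless
-- staged pipeline: boundary-index list, zip of consecutive boundaries, two filters
-- (objective: alternative decomposition); return values proved equal.

-- ===== PORT A =====
-- inner while: `while i < len(disk_map) and disk_map[i] is None: i += 1`
-- (fuel-guarded structural recursion; fuel dm.length - i always suffices: when it
-- hits 0 we have i ≥ dm.length and the while-condition is false anyway — exact)
def pvSkipNoneGo (dm : List (Option Int)) : Nat → Nat → Nat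
  | 0, i => i
  | f + 1, i => if i < dm.length ∧ dm[i]? = some none then pvSkipNoneGo dm f (i + 1) else i

def pvSkipNone (dm : List (Option Int)) (i : Nat) : Nat :=
  pvSkipNoneGo dm (dm.length - i) i

-- inner while: `while i < len(disk_map) and disk_map[i] == current_value: i += 1`
def pvSkipValGo (dm : List (Option Int)) (v : Int) : Nat → Nat → Nat
  | 0, i => i
  | f + 1, i => if i < dm.length ∧ dm[i]? = some (some v) then pvSkipValGo dm v f (i + 1) else i

def pvSkipVal (dm : List (Option Int)) (v : Int) (i : Nat) : Nat :=
  pvSkipValGo dm v (dm.length - i) i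

-- outer `while i < len(disk_map)` loop with accumulators free, blocks (fuel-guarded:
-- fuel dm.length suffices since each run advances i by at least one — exact)
def pvLoopA (dm : List (Option Int)) : Nat → Nat → List (Int × Int) → List (Int × Int) →
    (List (Int × Int)) × (List (Int × Int))
  | 0, _, free, blocks => (free, blocks.reverse)
  | f + 1, i, free, blocks =>
    if i < dm.length then
      match dm[i]? with
      | some none =>
          pvLoopA dm f (pvSkipNone dm i) (free ++ [((i : Int), ((pvSkipNone dm i : Nat) : Int) - (i : Int))]) blocks
      | some (some v) =>
          pvLoopA dm f (pvSkipVal dm v i) free (blocks ++ [((i : Int), ((pvSkipVal dm v i : Nat) : Int) - (i : Int))])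
      | none => (free, blocks.reverse)   -- unreachable: i < length
    else (free, blocks.reverse)          -- blocks[::-1] ported as List.reverse (exact)

def identify_ranges (disk_map : List (Option Int)) : (List (Int × Int)) × (List (Int × Int)) :=
  pvLoopA disk_map disk_map.length 0 [] []

-- ===== PORT B =====
-- bounds = [0] + [i for i in range(1, n) if disk_map[i] != disk_map[i-1]] + ([n] if n else [])
-- pairs  = list(zip(bounds, bounds[1:]))
-- free   = [(b, e - b) for b, e in pairs if disk_map[b] is None]       (b always < n)
-- blocks = [(b, e - b) for b, e in pairs if disk_map[b] is not None]
def identify_ranges_alt (disk_map : List (Option Int)) : (List (Int × Int)) × (List (Int × Int)) :=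
  let n := disk_map.length
  let bounds : List Nat :=
    0 :: (((List.range' 1 (n - 1)).filter (fun i => !(disk_map[i]? == disk_map[i - 1]?))) ++
      (if n = 0 then [] else [n]))
  let pairs := bounds.zip bounds.tail
  let free := (pairs.filter (fun p => disk_map[p.1]? == some none)).map
      (fun p => ((p.1 : Int), (p.2 : Int) - (p.1 : Int)))
  let blocks := (pairs.filter (fun p => !(disk_map[p.1]? == some none))).map
      (fun p => ((p.1 : Int), (p.2 : Int) - (p.1 : Int)))
  (free, blocks.reverse)   -- blocks[::-1] ported as List.reverse (exact)

-- ===== PRECONDITION & SPEC =====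
def Spec_identify_ranges (disk_map : List (Option Int)) (out : (List (Int × Int)) × (List (Int × Int))) : Prop := out = identify_ranges_alt disk_map
instance (disk_map : List (Option Int)) (out : (List (Int × Int)) × (List (Int × Int))) : Decidable (Spec_identify_ranges disk_map out) := by unfold Spec_identify_ranges; infer_instance

-- ===== CLAIM (what is proved, stated in full; the proofs are below) =====
def Claim_equal_identify_ranges : Prop := ∀ (disk_map : List (Option Int)), Dom_identify_ranges disk_map → Spec_identify_ranges disk_map (identify_ranges disk_map)

-- ===== LEMMAS AND PROOFS =====

-- run decomposition of dm starting at index i, mirroring pvLoopA's recursion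
def runsAF (dm : List (Option Int)) : Nat → Nat → List (Nat × Nat)
  | 0, _ => []
  | f + 1, i =>
    if i < dm.length then
      match dm[i]? with
      | some none => (i, pvSkipNone dm i) :: runsAF dm f (pvSkipNone dm i)
      | some (some v) => (i, pvSkipVal dm v i) :: runsAF dm f (pvSkipVal dm v i)
      | none => []
    else []

def freeOf (dm : List (Option Int)) (rs : List (Nat × Nat)) : List (Int × Int) :=
  (rs.filter (fun p => dm[p.1]? == some none)).map
    (fun p => ((p.1 : Int), (p.2 : Int) - (p.1 : Int)))

def blocksOf (dm : List (Option Int)) (rs : List (Nat × Nat)) : List (Int × Int) :=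
  (rs.filter (fun p => !(dm[p.1]? == some none))).map
    (fun p => ((p.1 : Int), (p.2 : Int) - (p.1 : Int)))

-- the tail of B's boundary list, seen from index i
def gB (dm : List (Option Int)) (i : Nat) : List Nat :=
  ((List.range' (i + 1) (dm.length - (i + 1))).filter
    (fun k => !(dm[k]? == dm[k - 1]?))) ++ [dm.length]

-- characterisation of the inner whiles (with sufficient fuel)
theorem skipNoneGo_spec (dm : List (Option Int)) : ∀ f i, dm.length ≤ f + i → i ≤ dm.length →
    i ≤ pvSkipNoneGo dm f i ∧ pvSkipNoneGo dm f i ≤ dm.length ∧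
    (∀ k, i ≤ k → k < pvSkipNoneGo dm f i → dm[k]? = some none) ∧
    (pvSkipNoneGo dm f i = dm.length ∨ dm[pvSkipNoneGo dm f i]? ≠ some none) := by
  intro f
  induction f with
  | zero =>
      intro i hf hi
      have : i = dm.length := by omega
      refine ⟨le_refl _, hi, fun k hk1 hk2 => ?_, Or.inl this⟩
      simp [pvSkipNoneGo] at hk2
      omega
  | succ f ih =>
      intro i hf hi
      by_cases hc : i < dm.length ∧ dm[i]? = some none
      · have := ih (i + 1) (by omega) (by omega)
        simp only [pvSkipNoneGo, if_pos hc]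
        refine ⟨by omega, this.2.1, fun k hk1 hk2 => ?_, this.2.2.2⟩
        rcases Nat.eq_or_lt_of_le hk1 with h | h
        · exact h ▸ hc.2
        · exact this.2.2.1 k h hk2
      · simp only [pvSkipNoneGo, if_neg hc]
        refine ⟨le_refl _, hi, fun k hk1 hk2 => by omega, ?_⟩
        rcases Nat.eq_or_lt_of_le hi with h | h
        · exact Or.inl h
        · exact Or.inr (fun e => hc ⟨h, e⟩)

theorem skipValGo_spec (dm : List (Option Int)) (v : Int) : ∀ f i, dm.length ≤ f + i → i ≤ dm.length →
    i ≤ pvSkipValGo dm v f i ∧ pvSkipValGo dm v f i ≤ dm.length ∧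
    (∀ k, i ≤ k → k < pvSkipValGo dm v f i → dm[k]? = some (some v)) ∧
    (pvSkipValGo dm v f i = dm.length ∨ dm[pvSkipValGo dm v f i]? ≠ some (some v)) := by
  intro f
  induction f with
  | zero =>
      intro i hf hi
      have : i = dm.length := by omega
      refine ⟨le_refl _, hi, fun k hk1 hk2 => ?_, Or.inl this⟩
      simp [pvSkipValGo] at hk2
      omega
  | succ f ih =>
      intro i hf hi
      by_cases hc : i < dm.length ∧ dm[i]? = some (some v)
      · have := ih (i + 1) (by omega) (by omega)
        simp only [pvSkipValGo, if_pos hc]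
        refine ⟨by omega, this.2.1, fun k hk1 hk2 => ?_, this.2.2.2⟩
        rcases Nat.eq_or_lt_of_le hk1 with h | h
        · exact h ▸ hc.2
        · exact this.2.2.1 k h hk2
      · simp only [pvSkipValGo, if_neg hc]
        refine ⟨le_refl _, hi, fun k hk1 hk2 => by omega, ?_⟩
        rcases Nat.eq_or_lt_of_le hi with h | h
        · exact Or.inl h
        · exact Or.inr (fun e => hc ⟨h, e⟩)

theorem pvSkipNone_spec (dm : List (Option Int)) (i : Nat) (hi : i ≤ dm.length) :
    i ≤ pvSkipNone dm i ∧ pvSkipNone dm i ≤ dm.length ∧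
    (∀ k, i ≤ k → k < pvSkipNone dm i → dm[k]? = some none) ∧
    (pvSkipNone dm i = dm.length ∨ dm[pvSkipNone dm i]? ≠ some none) :=
  skipNoneGo_spec dm (dm.length - i) i (by omega) hi

theorem pvSkipVal_spec (dm : List (Option Int)) (v : Int) (i : Nat) (hi : i ≤ dm.length) :
    i ≤ pvSkipVal dm v i ∧ pvSkipVal dm v i ≤ dm.length ∧
    (∀ k, i ≤ k → k < pvSkipVal dm v i → dm[k]? = some (some v)) ∧
    (pvSkipVal dm v i = dm.length ∨ dm[pvSkipVal dm v i]? ≠ some (some v)) :=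
  skipValGo_spec dm v (dm.length - i) i (by omega) hi

theorem pvSkipNone_lt (dm : List (Option Int)) (i : Nat) (h : i < dm.length)
    (hv : dm[i]? = some none) : i < pvSkipNone dm i := by
  unfold pvSkipNone
  have hf : dm.length - i = (dm.length - (i + 1)) + 1 := by omega
  rw [hf]
  simp only [pvSkipNoneGo, if_pos (And.intro h hv)]
  have := skipNoneGo_spec dm (dm.length - (i + 1)) (i + 1) (by omega) (by omega)
  omega

theorem pvSkipVal_lt (dm : List (Option Int)) (v : Int) (i : Nat) (h : i < dm.length)
    (hv : dm[i]? = some (some v)) : i < pvSkipVal dm v i := by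
  unfold pvSkipVal
  have hf : dm.length - i = (dm.length - (i + 1)) + 1 := by omega
  rw [hf]
  simp only [pvSkipValGo, if_pos (And.intro h hv)]
  have := skipValGo_spec dm v (dm.length - (i + 1)) (i + 1) (by omega) (by omega)
  omega

-- A's loop result, in terms of the run decomposition (any common fuel)
theorem loopA_runs (dm : List (Option Int)) : ∀ f i free b,
    pvLoopA dm f i free b =
      (free ++ freeOf dm (runsAF dm f i), (b ++ blocksOf dm (runsAF dm f i)).reverse) := by
  intro f
  induction f with
  | zero =>
      intro i free b
      simp [pvLoopA, runsAF, freeOf, blocksOf]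
  | succ f ih =>
      intro i free b
      by_cases h : i < dm.length
      · rcases hv : dm[i]? with _ | x
        · exact absurd (List.getElem?_eq_getElem h) (by simp [hv])
        · rcases x with _ | v
          · simp only [pvLoopA, runsAF, if_pos h, hv, ih]
            simp [freeOf, blocksOf, hv]
          · simp only [pvLoopA, runsAF, if_pos h, hv, ih]
            simp [freeOf, blocksOf, hv]
      · simp [pvLoopA, runsAF, if_neg h, freeOf, blocksOf]

-- splitting the range i+1 .. n-1 at j
theorem range'_split (i j n : Nat) (hij : i < j) (hjn : j ≤ n) :
    List.range' (i + 1) (n - (i + 1)) =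
      List.range' (i + 1) (j - (i + 1)) ++ List.range' j (n - j) := by
  have ha : List.range' (i + 1) (j - (i + 1)) ++ List.range' (i + 1 + 1 * (j - (i + 1))) (n - j)
      = List.range' (i + 1) (j - (i + 1) + (n - j)) := List.range'_append ..
  have hb : i + 1 + 1 * (j - (i + 1)) = j := by omega
  have hc : j - (i + 1) + (n - j) = n - (i + 1) := by omega
  rw [hb, hc] at ha
  exact ha.symm

-- the boundary list from i splits off the next run end j
theorem gB_split (dm : List (Option Int)) (i j : Nat) (hij : i < j) (hjle : j ≤ dm.length)
    (hconst : ∀ k, i ≤ k → k < j → dm[k]? = dm[i]?)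
    (hbound : j = dm.length ∨ dm[j]? ≠ dm[j - 1]?) :
    gB dm i = j :: (if j < dm.length then gB dm j else []) := by
  unfold gB
  rw [range'_split i j dm.length hij hjle, List.filter_append]
  have h1 : (List.range' (i + 1) (j - (i + 1))).filter
      (fun k => !(dm[k]? == dm[k - 1]?)) = [] := by
    rw [List.filter_eq_nil_iff]
    intro k hk
    rw [List.mem_range'] at hk
    have e1 : dm[k]? = dm[i]? := hconst k (by omega) (by omega)
    have e2 : dm[k - 1]? = dm[i]? := hconst (k - 1) (by omega) (by omega)
    simp [e1, e2]
  rw [h1]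
  by_cases hjn : j < dm.length
  · have hrange : List.range' j (dm.length - j) = j :: List.range' (j + 1) (dm.length - (j + 1)) := by
      have : dm.length - j = (dm.length - (j + 1)) + 1 := by omega
      rw [this, List.range'_succ]
    have hjb : dm[j]? ≠ dm[j - 1]? := by
      rcases hbound with h' | h'
      · omega
      · exact h'
    rw [hrange, List.filter_cons, if_pos (by simpa using hjb)]
    simp [hjn]
  · have hjeq : j = dm.length := by omega
    have : dm.length - j = 0 := by omega
    rw [this]
    simp [hjeq]

-- B's zipped boundary chain equals A's run decomposition (with sufficient fuel)
theorem chain_eq_runsA (dm : List (Option Int)) : ∀ f i, i < dm.length → dm.length ≤ f + i →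
    ((i :: gB dm i).zip (gB dm i)) = runsAF dm f i := by
  intro f
  induction f with
  | zero => intro i h hf; omega
  | succ f ih =>
      intro i h hf
      rcases hv : dm[i]? with _ | x
      · exact absurd (List.getElem?_eq_getElem h) (by simp [hv])
      rcases x with _ | v
      · obtain ⟨_, hjle, hconst, hbound⟩ := pvSkipNone_spec dm i (le_of_lt h)
        have hij : i < pvSkipNone dm i := pvSkipNone_lt dm i h hv
        have hsplit := gB_split dm i (pvSkipNone dm i) hij hjle
          (fun k hk1 hk2 => by rw [hconst k hk1 hk2, hv])
          (by
            rcases hbound with h' | h'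
            · exact Or.inl h'
            · refine Or.inr ?_
              have : dm[pvSkipNone dm i - 1]? = some none := hconst _ (by omega) (by omega)
              rw [this]; exact h')
        simp only [runsAF, if_pos h, hv]
        by_cases hjn : pvSkipNone dm i < dm.length
        · rw [if_pos hjn] at hsplit
          rw [hsplit]
          simp only [List.zip_cons_cons]
          rw [ih (pvSkipNone dm i) hjn (by omega)]
        · rw [if_neg hjn] at hsplit
          rw [hsplit]
          have : runsAF dm f (pvSkipNone dm i) = [] := by
            cases f <;> simp [runsAF, if_neg hjn]
          rw [this]
          simp
      · obtain ⟨_, hjle, hconst, hbound⟩ := pvSkipVal_spec dm v i (le_of_lt h)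
        have hij : i < pvSkipVal dm v i := pvSkipVal_lt dm v i h hv
        have hsplit := gB_split dm i (pvSkipVal dm v i) hij hjle
          (fun k hk1 hk2 => by rw [hconst k hk1 hk2, hv])
          (by
            rcases hbound with h' | h'
            · exact Or.inl h'
            · refine Or.inr ?_
              have : dm[pvSkipVal dm v i - 1]? = some (some v) := hconst _ (by omega) (by omega)
              rw [this]; exact h')
        simp only [runsAF, if_pos h, hv]
        by_cases hjn : pvSkipVal dm v i < dm.length
        · rw [if_pos hjn] at hsplit
          rw [hsplit]
          simp only [List.zip_cons_cons]
          rw [ih (pvSkipVal dm v i) hjn (by omega)]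
        · rw [if_neg hjn] at hsplit
          rw [hsplit]
          have : runsAF dm f (pvSkipVal dm v i) = [] := by
            cases f <;> simp [runsAF, if_neg hjn]
          rw [this]
          simp

-- ===== VERDICT (by name: the statement is the Claim_ definition above) =====
theorem identify_ranges_spec : Claim_equal_identify_ranges := by
  intro dm _
  unfold Spec_identify_ranges identify_ranges identify_ranges_alt
  rw [loopA_runs dm dm.length 0 [] []]
  by_cases hn : dm.length = 0
  · rw [List.length_eq_zero_iff] at hn
    subst hn
    simp [runsAF, freeOf, blocksOf]
  · have h0 : 0 < dm.length := by omega
    have hbounds : (0 :: (((List.range' 1 (dm.length - 1)).filter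
        (fun i => !(dm[i]? == dm[i - 1]?))) ++
        (if dm.length = 0 then [] else [dm.length]))) = 0 :: gB dm 0 := by
      rw [if_neg hn]; rfl
    simp only [hbounds, List.tail_cons]
    rw [chain_eq_runsA dm dm.length 0 h0 (by omega)]
    simp [freeOf, blocksOf]
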